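-- pv_equiv track=rewrite | github.com/Noor-Nasri/daily-leetcode | 2690-house-robber-iv/house-robber-iv.py | canStealKHousesWithCapability
-- ===== SOURCE A (Python) =====
-- def canStealKHousesWithCapability(nums, k, capability):
--     ind = 0
--
--     while ind < len(nums) and k:
--         if nums[ind] <= capability:
--             ind += 1
--             k -= 1
--
--         ind += 1
--
--     return k == 0
-- ===== SOURCE B (Python) =====
-- def canStealKHousesWithCapability(nums, k, capability):
--     total = 0
--     run = 0
--     for x in nums:
--         if x <= capability:
--             run += 1
--         else:
--             total += (run + 1) // 2
--             run = 0
--     total += (run + 1) // 2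
--     return 0 <= k <= total
-- ===== Notes on version B (the rewrite author's own statement) =====
-- stated objective: alternative
-- what changed: Instead of simulating the greedy step-and-skip walk with an index, repeated nums[ind] lookups and a decrementing counter, B makes one direct pass over the elements summing ceil(L/2) per maximal run of eligible houses (nums[i] <= capability) and returns 0 <= k <= that maximum.
import Mathlib
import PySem

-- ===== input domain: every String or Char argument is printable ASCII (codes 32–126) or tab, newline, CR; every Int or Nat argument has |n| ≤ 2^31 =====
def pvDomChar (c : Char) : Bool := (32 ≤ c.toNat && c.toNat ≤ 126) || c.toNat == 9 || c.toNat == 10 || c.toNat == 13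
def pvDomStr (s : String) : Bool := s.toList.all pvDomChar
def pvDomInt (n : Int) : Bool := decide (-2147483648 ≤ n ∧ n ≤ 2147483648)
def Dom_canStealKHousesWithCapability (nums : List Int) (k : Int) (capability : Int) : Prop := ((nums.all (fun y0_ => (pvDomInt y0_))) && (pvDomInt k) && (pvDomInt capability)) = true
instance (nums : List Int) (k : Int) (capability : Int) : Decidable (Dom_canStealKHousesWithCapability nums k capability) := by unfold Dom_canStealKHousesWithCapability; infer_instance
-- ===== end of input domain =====

-- B replaces A's greedy step-and-skip walk by a run-length pass summing ceil(L/2) per maximal eligible run (alternative decomposition, same cost).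

-- ===== PORT A =====
-- the while loop: state (ind, k); returns the final k
def pvALoop (nums : List Int) (capability ind k : Int) : Int :=
  if h : ind < (nums.length : Int) ∧ k ≠ 0 then
    if (PySem.List.pyGet? nums ind).getD 0 ≤ capability then
      pvALoop nums capability (ind + 2) (k - 1)     -- ind += 1; k -= 1; ind += 1
    else
      pvALoop nums capability (ind + 1) k           -- ind += 1
  else k
termination_by ((nums.length : Int) - ind).toNat
decreasing_by all_goals omega

def canStealKHousesWithCapability (nums : List Int) (k : Int) (capability : Int) : Bool :=
  decide (pvALoop nums capability 0 k = 0)          -- return k == 0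

-- ===== PORT B =====
-- the for loop: state (run, total); the [] case is the final 'total += (run + 1) // 2'
def pvBLoop (l : List Int) (capability run total : Int) : Int :=
  match l with
  | [] => total + PySem.Int.floordiv (run + 1) 2
  | x :: t =>
    if x ≤ capability then pvBLoop t capability (run + 1) total
    else pvBLoop t capability 0 (total + PySem.Int.floordiv (run + 1) 2)

def canStealKHousesWithCapability_alt (nums : List Int) (k : Int) (capability : Int) : Bool :=
  decide (0 ≤ k ∧ k ≤ pvBLoop nums capability 0 0)  -- return 0 <= k <= total

-- ===== PRECONDITION & SPEC =====
def Spec_canStealKHousesWithCapability (nums : List Int) (k : Int) (capability : Int) (out : Bool) : Prop := out = canStealKHousesWithCapability_alt nums k capability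
instance (nums : List Int) (k : Int) (capability : Int) (out : Bool) : Decidable (Spec_canStealKHousesWithCapability nums k capability out) := by unfold Spec_canStealKHousesWithCapability; infer_instance

-- ===== CLAIM (what is proved, stated in full; the proofs are below) =====
def Claim_equal_canStealKHousesWithCapability : Prop := ∀ (nums : List Int) (k : Int) (capability : Int), Dom_canStealKHousesWithCapability nums k capability → Spec_canStealKHousesWithCapability nums k capability (canStealKHousesWithCapability nums k capability)

-- ===== LEMMAS AND PROOFS =====

-- greedy count over eligibility booleans: take the first True, skip its neighbour
def pvG (bs : List Bool) : Int :=
  match bs with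
  | [] => 0
  | b :: t => if b then 1 + pvG t.tail else pvG t
termination_by bs.length
decreasing_by all_goals (simp only [List.length_tail, List.length_cons]; omega)

lemma pvG_nonneg (bs : List Bool) : 0 ≤ pvG bs := by
  induction bs using pvG.induct with
  | case1 => simp [pvG]
  | case2 t ih => simp only [pvG, if_pos]; omega
  | case3 b t hb ih => simpa [pvG, hb] using ih

-- list-state version of A's loop (x ≤ cap consumes the head and skips one more)
def pvLA (l : List Int) (capability k : Int) : Int :=
  match l with
  | [] => k
  | x :: t =>
    if k ≠ 0 then
      if x ≤ capability then pvLA t.tail capability (k - 1) else pvLA t capability k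
    else k
termination_by l.length
decreasing_by all_goals (simp only [List.length_tail, List.length_cons]; omega)

lemma pvALoop_eq_pvLA (nums : List Int) (capability : Int) :
    ∀ (ind k : Int), 0 ≤ ind → pvALoop nums capability ind k = pvLA (nums.drop ind.toNat) capability k := by
  intro ind k
  induction ind, k using pvALoop.induct (nums := nums) (capability := capability) with
  | case1 ind k h hle ih =>
    intro hind
    obtain ⟨hlt, hk⟩ := h
    have hlt' : ind.toNat < nums.length := by omega
    have hget : PySem.List.pyGet? nums ind = some nums[ind.toNat] :=
      PySem.List.pyGet?_eq_some_getElem nums hind hlt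
    have hxle : nums[ind.toNat] ≤ capability := by rw [hget] at hle; simpa using hle
    rw [pvALoop, dif_pos ⟨hlt, hk⟩, if_pos hle, ih (by omega),
        List.drop_eq_getElem_cons hlt', pvLA, if_pos hk, if_pos hxle, List.tail_drop,
        show (ind + 2).toNat = ind.toNat + 1 + 1 by omega]
  | case2 ind k h hle ih =>
    intro hind
    obtain ⟨hlt, hk⟩ := h
    have hlt' : ind.toNat < nums.length := by omega
    have hget : PySem.List.pyGet? nums ind = some nums[ind.toNat] :=
      PySem.List.pyGet?_eq_some_getElem nums hind hlt
    have hxle : ¬ nums[ind.toNat] ≤ capability := by rw [hget] at hle; simpa using hle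
    rw [pvALoop, dif_pos ⟨hlt, hk⟩, if_neg hle, ih (by omega),
        List.drop_eq_getElem_cons hlt', pvLA, if_pos hk, if_neg hxle,
        show (ind + 1).toNat = ind.toNat + 1 by omega]
  | case3 ind k h =>
    intro hind
    rw [pvALoop, dif_neg h]
    rcases not_and_or.mp h with hge | hk
    · have : nums.drop ind.toNat = [] := List.drop_eq_nil_of_le (by omega)
      rw [this, pvLA]
    · have hk0 : k = 0 := by omega
      subst hk0
      cases nums.drop ind.toNat <;> simp [pvLA]

-- A's final k is 0 iff 0 ≤ k ≤ greedy count
lemma pvLA_zero_iff (capability : Int) :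
    ∀ (l : List Int) (k : Int),
      pvLA l capability k = 0 ↔ (0 ≤ k ∧ k ≤ pvG (l.map (fun x => decide (x ≤ capability)))) := by
  intro l k
  induction l, k using pvLA.induct (capability := capability) with
  | case1 k => simp [pvLA, pvG]; omega
  | case2 k x t hk hxle ih =>
    rw [pvLA, if_pos hk, if_pos hxle]
    simp only [List.map_cons, decide_eq_true hxle, pvG, if_pos, ← List.map_tail]
    rw [ih]
    have := pvG_nonneg (t.tail.map (fun x => decide (x ≤ capability)))
    omega
  | case3 k x t hk hxle ih =>
    rw [pvLA, if_pos hk, if_neg hxle]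
    simp only [List.map_cons, decide_eq_false hxle, pvG, Bool.false_eq_true, if_neg,
      not_false_eq_true]
    rw [ih]
  | case4 k x t hk =>
    have hk0 : k = 0 := by omega
    subst hk0
    rw [pvLA, if_neg hk]
    have := pvG_nonneg ((x :: t).map (fun x => decide (x ≤ capability)))
    constructor
    · intro _; omega
    · intro _; rfl

-- ceil(r/2) of a run of r Trues
lemma pvG_replicate (r : Nat) :
    pvG (List.replicate r true) = PySem.Int.floordiv ((r : Int) + 1) 2 := by
  induction r using Nat.strong_induction_on with
  | _ r ih =>
    match r with
    | 0 =>
      rw [PySem.Int.floordiv_eq_ediv_of_pos (by omega)]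
      norm_num [pvG]
    | 1 =>
      rw [PySem.Int.floordiv_eq_ediv_of_pos (by omega)]
      norm_num [pvG, List.replicate]
    | (n + 2) =>
      rw [List.replicate_succ, List.replicate_succ]
      simp only [pvG, if_pos, List.tail_cons]
      rw [ih n (by omega),
          PySem.Int.floordiv_eq_ediv_of_pos (a := (n : Int) + 1) (by omega),
          PySem.Int.floordiv_eq_ediv_of_pos (by omega)]
      push_cast
      omega

-- a False separator after a run of Trues splits the greedy count
lemma pvG_sep (s : List Bool) : ∀ (r : Nat),
    pvG (List.replicate r true ++ false :: s) = pvG (List.replicate r true) + pvG s := by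
  intro r
  induction r using Nat.strong_induction_on with
  | _ r ih =>
    match r with
    | 0 => simp [pvG]
    | 1 => simp [pvG, List.replicate]
    | (n + 2) =>
      rw [List.replicate_succ, List.replicate_succ]
      simp only [List.cons_append, pvG, if_pos, List.tail_cons]
      rw [ih n (by omega)]
      omega

lemma pvBLoop_eq_pvG (l : List Int) (capability : Int) :
    ∀ (total : Int) (r : Nat),
      pvBLoop l capability (r : Int) total
        = total + pvG (List.replicate r true ++ l.map (fun x => decide (x ≤ capability))) := by
  induction l with
  | nil =>
    intro total r
    simp [pvBLoop, pvG_replicate]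
  | cons x t ih =>
    intro total r
    by_cases hle : x ≤ capability
    · rw [pvBLoop]
      simp only [if_pos hle]
      have hcast : (r : Int) + 1 = ((r + 1 : Nat) : Int) := by push_cast; ring
      rw [hcast, ih total (r + 1)]
      congr 2
      simp [List.map_cons, decide_eq_true hle, List.replicate_succ', List.append_assoc]
    · rw [pvBLoop]
      simp only [if_neg hle]
      have h0 := ih (total + PySem.Int.floordiv ((r : Int) + 1) 2) 0
      simp only [Nat.cast_zero, List.replicate_zero, List.nil_append] at h0
      rw [h0, List.map_cons, decide_eq_false hle, pvG_sep, pvG_replicate]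
      ring

-- ===== VERDICT (by name: the statement is the Claim_ definition above) =====
theorem canStealKHousesWithCapability_spec : Claim_equal_canStealKHousesWithCapability := by
  intro nums k capability _
  unfold Spec_canStealKHousesWithCapability
  unfold canStealKHousesWithCapability canStealKHousesWithCapability_alt
  rw [pvALoop_eq_pvLA nums capability 0 k le_rfl]
  simp only [Int.toNat_zero, List.drop_zero]
  have hB := pvBLoop_eq_pvG nums capability 0 0
  simp only [Nat.cast_zero, List.replicate_zero, List.nil_append, zero_add] at hB
  simp only [hB]
  rw [decide_eq_decide]
  exact pvLA_zero_iff capability nums k
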